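-- pv_equiv track=rewrite | github.com/JuanCasado/UAH_2016_2017 | PYTHON/ejercicio4_5.py | calificaciones
-- ===== SOURCE A (Python) =====
-- def calificaciones(lista):
--       '''list==>list
--       OBJ: transorma numeros del 1 al 10 a calificaciones
--       PRE: valores de lista del 1 al 10'''
--       calificaciones=[]
--       for i in range(len(lista)):
--             if 0<=lista[i]<5:
--                   calificaciones.append('Suspenso')
--             if 5<=lista[i]<7:
--                   calificaciones.append('Suficiente')
--             if 7<=lista[i]<9:
--                   calificaciones.append('Notable')
--             if 9<=lista[i]<=10:
--                   calificaciones.append('Sobresaliente')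
--       return calificaciones
-- ===== SOURCE B (Python) =====
-- _LABELS = ['Suspenso', 'Suficiente', 'Notable', 'Sobresaliente']
-- _BOUNDS = [5, 7, 9]
--
-- def calificaciones(lista):
--     '''Table-driven: label index = number of boundaries <= x; skip out-of-range values.'''
--     return [_LABELS[sum(1 for b in _BOUNDS if b <= x)] for x in lista if 0 <= x <= 10]
-- ===== Notes on version B (the rewrite author's own statement) =====
-- stated objective: idiomatic
-- what changed: Replaced the indexed loop with four separate interval tests per element by a single comprehension over a boundary/label table: the label index is the count of boundaries <= x and out-of-range values are filtered out, avoiding per-element list indexing and repeated appends.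
import Mathlib
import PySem

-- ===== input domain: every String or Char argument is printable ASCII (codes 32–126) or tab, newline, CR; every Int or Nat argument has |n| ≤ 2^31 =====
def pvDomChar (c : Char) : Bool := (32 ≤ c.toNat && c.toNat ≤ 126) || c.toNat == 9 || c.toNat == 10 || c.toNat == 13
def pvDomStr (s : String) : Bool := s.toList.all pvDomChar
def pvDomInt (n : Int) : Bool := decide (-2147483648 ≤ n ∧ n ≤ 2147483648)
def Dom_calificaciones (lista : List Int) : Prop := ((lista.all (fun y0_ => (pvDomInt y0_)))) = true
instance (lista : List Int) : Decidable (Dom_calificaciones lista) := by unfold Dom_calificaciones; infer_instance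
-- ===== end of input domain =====

-- B maps each in-range grade through a boundary/label table (label index = count of boundaries ≤ x) instead of four per-element interval tests; objective: idiomatic.


-- ===== PORT A =====
def calificaciones (lista : List Int) : List String :=
  (PySem.List.pyRange 0 (PySem.List.len lista) 1).foldl
    (fun acc i =>
      let x := PySem.List.pyGetD lista i 0
      let acc := if 0 ≤ x ∧ x < 5 then acc ++ ["Suspenso"] else acc
      let acc := if 5 ≤ x ∧ x < 7 then acc ++ ["Suficiente"] else acc
      let acc := if 7 ≤ x ∧ x < 9 then acc ++ ["Notable"] else acc
      if 9 ≤ x ∧ x ≤ 10 then acc ++ ["Sobresaliente"] else acc) []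

-- ===== PORT B =====
def pvLabels : List String := ["Suspenso", "Suficiente", "Notable", "Sobresaliente"]
def pvBounds : List Int := [5, 7, 9]

def calificaciones_alt (lista : List Int) : List String :=
  (lista.filter (fun x => decide (0 ≤ x) && decide (x ≤ 10))).map
    (fun x => pvLabels.getD (pvBounds.countP (fun b => decide (b ≤ x))) "")

-- ===== PRECONDITION & SPEC =====
def Spec_calificaciones (lista : List Int) (out : List String) : Prop := out = calificaciones_alt lista
instance (lista : List Int) (out : List String) : Decidable (Spec_calificaciones lista out) := by unfold Spec_calificaciones; infer_instance

-- ===== CLAIM (what is proved, stated in full; the proofs are below) =====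
def Claim_equal_calificaciones : Prop := ∀ (lista : List Int), Dom_calificaciones lista → Spec_calificaciones lista (calificaciones lista)

-- ===== LEMMAS AND PROOFS =====

-- one loop-body step of A equals B's per-element contribution
lemma pv_step_eq (acc : List String) (x : Int) :
    (let a1 := if 0 ≤ x ∧ x < 5 then acc ++ ["Suspenso"] else acc
     let a2 := if 5 ≤ x ∧ x < 7 then a1 ++ ["Suficiente"] else a1
     let a3 := if 7 ≤ x ∧ x < 9 then a2 ++ ["Notable"] else a2
     if 9 ≤ x ∧ x ≤ 10 then a3 ++ ["Sobresaliente"] else a3)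
    = acc ++ (if 0 ≤ x ∧ x ≤ 10 then
        [pvLabels.getD (pvBounds.countP (fun b => decide (b ≤ x))) ""] else []) := by
  simp only [pvLabels, pvBounds, List.countP, List.countP.go]
  rcases (by omega :
      x < 0 ∨ (0 ≤ x ∧ x < 5) ∨ (5 ≤ x ∧ x < 7) ∨ (7 ≤ x ∧ x < 9) ∨ (9 ≤ x ∧ x ≤ 10) ∨ 10 < x)
    with h | h | h | h | h | h
  · have e0 : ¬ (0:Int) ≤ x := by omega
    have e5 : ¬ (5:Int) ≤ x := by omega
    have e7 : ¬ (7:Int) ≤ x := by omega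
    have e9 : ¬ (9:Int) ≤ x := by omega
    simp [e0, e5, e7, e9]
  · have e5 : ¬ (5:Int) ≤ x := by omega
    have e7 : ¬ (7:Int) ≤ x := by omega
    have e9 : ¬ (9:Int) ≤ x := by omega
    have e10 : x ≤ 10 := by omega
    simp [h.1, h.2, e5, e7, e9, e10]
  · have e7 : ¬ (7:Int) ≤ x := by omega
    have e9 : ¬ (9:Int) ≤ x := by omega
    have e0 : (0:Int) ≤ x := by omega
    have e10 : x ≤ 10 := by omega
    simp [h.1, h.2, e0, e7, e9, e10]
  · have e9 : ¬ (9:Int) ≤ x := by omega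
    have e0 : (0:Int) ≤ x := by omega
    have e10 : x ≤ 10 := by omega
    simp [h.1, h.2, e0, e9, e10, (by omega : (5:Int) ≤ x)]
    rw [if_neg (by omega : ¬ x < 7), if_neg (by omega : ¬ x < 5)]
  · have e0 : (0:Int) ≤ x := by omega
    simp [h.1, h.2, e0, (by omega : (5:Int) ≤ x), (by omega : (7:Int) ≤ x)]
    rw [if_neg (by omega : ¬ x < 9), if_neg (by omega : ¬ x < 7), if_neg (by omega : ¬ x < 5)]
  · have e10 : ¬ x ≤ 10 := by omega
    simp [e10]
    rw [if_neg (by omega : ¬ ((7:Int) ≤ x ∧ x < 9)), if_neg (by omega : ¬ ((5:Int) ≤ x ∧ x < 7)),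
      if_neg (by omega : ¬ ((0:Int) ≤ x ∧ x < 5))]

lemma pv_foldl_eq (lista : List Int) (acc : List String) :
    lista.foldl
      (fun acc x =>
        let a1 := if 0 ≤ x ∧ x < 5 then acc ++ ["Suspenso"] else acc
        let a2 := if 5 ≤ x ∧ x < 7 then a1 ++ ["Suficiente"] else a1
        let a3 := if 7 ≤ x ∧ x < 9 then a2 ++ ["Notable"] else a2
        if 9 ≤ x ∧ x ≤ 10 then a3 ++ ["Sobresaliente"] else a3) acc
    = acc ++ calificaciones_alt lista := by
  induction lista generalizing acc with
  | nil => simp [calificaciones_alt]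
  | cons x l ih =>
    simp only [List.foldl_cons]
    rw [pv_step_eq, ih]
    by_cases h : 0 ≤ x ∧ x ≤ 10
    · simp [calificaciones_alt, h.1, h.2, List.append_assoc]
    · have hb : (decide (0 ≤ x) && decide (x ≤ 10)) = false := by
        simp only [Bool.and_eq_false_iff, decide_eq_false_iff_not]; omega
      simp [calificaciones_alt, hb, h]

-- ===== VERDICT (by name: the statement is the Claim_ definition above) =====
theorem calificaciones_spec : Claim_equal_calificaciones := by
  intro lista _
  unfold Spec_calificaciones calificaciones
  exact (PySem.List.foldl_pyRange_zero_pyGetD lista 0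
    (fun acc x =>
      let a1 := if 0 ≤ x ∧ x < 5 then acc ++ ["Suspenso"] else acc
      let a2 := if 5 ≤ x ∧ x < 7 then a1 ++ ["Suficiente"] else a1
      let a3 := if 7 ≤ x ∧ x < 9 then a2 ++ ["Notable"] else a2
      if 9 ≤ x ∧ x ≤ 10 then a3 ++ ["Sobresaliente"] else a3) []).trans (pv_foldl_eq lista [])
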